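-- pv_equiv track=rewrite | github.com/sahil82764/hrManagementSystem | util/util.py | find_common_sequence
-- ===== SOURCE A (Python) =====
-- def find_common_sequence(strings):
--     words_list = [s.split() for s in strings]
--     common_sequence = []
--
--     for word_group in zip(*words_list):
--         if all(w == word_group[0] for w in word_group):
--             common_sequence.append(word_group[0])
--         else:
--             break
--
--     return " ".join(common_sequence)
-- ===== SOURCE B (Python) =====
-- def find_common_sequence(strings):
--     if not strings:
--         return ""
--     prefix = strings[0].split()
--     for s in strings[1:]:
--         words = s.split()
--         keep = []
--         for p, w in zip(prefix, words):
--             if p != w: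
--                 break
--             keep.append(p)
--         prefix = keep
--     return " ".join(prefix)
-- ===== Notes on version B (the rewrite author's own statement) =====
-- stated objective: alternative
-- what changed: B folds string-by-string, shrinking a running prefix of word lists, instead of A's simultaneous column-wise zip over all word lists with an all-equal test per column.
import Mathlib
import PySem

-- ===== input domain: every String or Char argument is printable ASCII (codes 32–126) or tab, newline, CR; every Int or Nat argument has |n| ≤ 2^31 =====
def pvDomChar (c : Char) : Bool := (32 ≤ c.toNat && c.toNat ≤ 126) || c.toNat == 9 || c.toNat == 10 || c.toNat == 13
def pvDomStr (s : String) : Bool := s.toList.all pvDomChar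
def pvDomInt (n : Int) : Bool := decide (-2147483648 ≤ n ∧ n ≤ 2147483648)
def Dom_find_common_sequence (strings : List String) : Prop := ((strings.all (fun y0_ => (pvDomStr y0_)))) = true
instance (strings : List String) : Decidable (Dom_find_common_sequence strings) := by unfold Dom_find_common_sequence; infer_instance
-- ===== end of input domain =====

-- B folds string-by-string with a shrinking common-prefix accumulator instead of A's column-wise zip; alternative decomposition, same cost.


-- ===== PORT A =====
-- zip(*words_list): transpose truncated at the first exhausted list (empty if no lists)
def pvZipGo : List String → List (List String) → List (List String)
  | [], _ => []
  | x :: xs, rest =>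
      if rest.any List.isEmpty then []
      else (x :: rest.map (·.headD "")) :: pvZipGo xs (rest.map List.tail)

def pvZip : List (List String) → List (List String)
  | [] => []
  | l :: rest => pvZipGo l rest

-- the for-loop with break: append group[0] while all members equal it
def pvLoopA : List (List String) → List String
  | [] => []
  | [] :: _ => []   -- unreachable: zip only yields nonempty groups
  | (x :: g) :: gs => if (x :: g).all (fun w => w == x) then x :: pvLoopA gs else []

def find_common_sequence (strings : List String) : String :=
  PySem.Str.join " " (pvLoopA (pvZip (strings.map PySem.Str.split₀)))

-- ===== PORT B =====
-- the inner zip loop of Source B: longest common leading run of two word lists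
def pvCp : List String → List String → List String
  | x :: xs, y :: ys => if x == y then x :: pvCp xs ys else []
  | _, _ => []

def find_common_sequence_alt (strings : List String) : String :=
  match strings with
  | [] => ""
  | s :: rest =>
      PySem.Str.join " " (rest.foldl (fun pre t => pvCp pre (PySem.Str.split₀ t)) (PySem.Str.split₀ s))

-- ===== PRECONDITION & SPEC =====
def Spec_find_common_sequence (strings : List String) (out : String) : Prop := out = find_common_sequence_alt strings
instance (strings : List String) (out : String) : Decidable (Spec_find_common_sequence strings out) := by unfold Spec_find_common_sequence; infer_instance

-- ===== CLAIM (what is proved, stated in full; the proofs are below) =====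
def Claim_equal_find_common_sequence : Prop := ∀ (strings : List String), Dom_find_common_sequence strings → Spec_find_common_sequence strings (find_common_sequence strings)

-- ===== LEMMAS AND PROOFS =====

theorem pvCp_nil_right (a : List String) : pvCp a [] = [] := by cases a <;> rfl

theorem foldl_pvCp_nil (ws : List (List String)) : ws.foldl pvCp [] = [] := by
  induction ws with
  | nil => rfl
  | cons r rs ih => simpa [pvCp] using ih

theorem foldl_pvCp_mem_nil (ws : List (List String)) (h : [] ∈ ws) (a : List String) :
    ws.foldl pvCp a = [] := by
  induction ws generalizing a with
  | nil => exact absurd h (by simp)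
  | cons r rs ih =>
    rcases List.mem_cons.mp h with h1 | h1
    · subst h1; simpa [pvCp_nil_right] using foldl_pvCp_nil rs
    · exact ih h1 _

theorem foldl_pvCp_cons (x : String) (ws : List (List String))
    (h : ∀ r ∈ ws, ∃ t, r = x :: t) (a : List String) :
    ws.foldl pvCp (x :: a) = x :: (ws.map List.tail).foldl pvCp a := by
  induction ws generalizing a with
  | nil => rfl
  | cons r rs ih =>
    obtain ⟨t, rfl⟩ := h r (by simp)
    simp only [List.foldl_cons, List.map_cons, List.tail_cons, pvCp, beq_self_eq_true, if_true]
    exact ih (fun r hr => h r (by simp [hr])) _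

theorem foldl_pvCp_break (x : String) (ws : List (List String))
    (h : ∃ r ∈ ws, r.head? ≠ some x) (a : List String) :
    ws.foldl pvCp (x :: a) = [] := by
  induction ws generalizing a with
  | nil => simp at h
  | cons r rs ih =>
    cases r with
    | nil => simpa [pvCp_nil_right] using foldl_pvCp_nil rs
    | cons y t =>
      by_cases hy : y = x
      · have h' : ∃ r ∈ rs, r.head? ≠ some x := by
          rcases h with ⟨r, hr, hne⟩
          rcases List.mem_cons.mp hr with rfl | hr
          · simp [hy] at hne
          · exact ⟨r, hr, hne⟩
        rw [hy]
        simp only [List.foldl_cons, pvCp, beq_self_eq_true, if_true]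
        exact ih h' _
      · simp only [List.foldl_cons, pvCp, beq_iff_eq]
        rw [if_neg (by simpa [eq_comm] using hy)]
        exact foldl_pvCp_nil rs

theorem main_lemma (w : List String) (ws : List (List String)) :
    pvLoopA (pvZipGo w ws) = ws.foldl pvCp w := by
  induction w generalizing ws with
  | nil => simp [pvZipGo, pvLoopA, foldl_pvCp_nil]
  | cons x xs ih =>
    by_cases hE : ws.any List.isEmpty
    · rw [pvZipGo, if_pos hE]
      have : [] ∈ ws := by
        rcases List.any_eq_true.mp hE with ⟨r, hr, hr'⟩
        rcases r with _ | _
        · exact hr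
        · simp at hr'
      simp [pvLoopA, foldl_pvCp_mem_nil ws this]
    · rw [pvZipGo, if_neg hE]
      have hne : ∀ r ∈ ws, r ≠ [] := by
        intro r hr hnil
        exact hE (List.any_eq_true.mpr ⟨r, hr, by simp [hnil]⟩)
      by_cases hall : ∀ r ∈ ws, r.headD "" = x
      · have hcons : ∀ r ∈ ws, ∃ t, r = x :: t := by
          intro r hr
          cases r with
          | nil => exact absurd rfl (hne _ hr)
          | cons y t => exact ⟨t, by rw [← hall _ hr]; rfl⟩
        have hck : ((x :: ws.map (·.headD "")).all (fun w => w == x)) = true := by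
          simp only [List.all_cons, List.all_eq_true, List.mem_map, beq_self_eq_true,
            Bool.true_and]
          rintro b ⟨r, hr, rfl⟩
          simpa using hall _ hr
        rw [pvLoopA, if_pos hck, ih, foldl_pvCp_cons x ws hcons]
      · push Not at hall
        obtain ⟨r, hr, hrx⟩ := hall
        have hck : ¬ ((x :: ws.map (·.headD "")).all (fun w => w == x) = true) := by
          simp only [List.all_cons, List.all_eq_true, List.mem_map, beq_self_eq_true,
            Bool.true_and, beq_iff_eq]
          push Not
          exact ⟨r.headD "", ⟨r, hr, rfl⟩, hrx⟩
        rw [pvLoopA, if_neg hck]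
        have : ∃ r ∈ ws, r.head? ≠ some x := by
          refine ⟨r, hr, ?_⟩
          cases r with
          | nil => simp
          | cons y t => simpa using fun h => hrx (by simp [h])
        rw [foldl_pvCp_break x ws this]

-- ===== VERDICT (by name: the statement is the Claim_ definition above) =====
theorem find_common_sequence_spec : Claim_equal_find_common_sequence := by
  intro strings _
  unfold Spec_find_common_sequence find_common_sequence find_common_sequence_alt
  cases strings with
  | nil => rfl
  | cons s rest =>
    rw [List.map_cons, pvZip, main_lemma, List.foldl_map]
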